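-- pv_equiv track=rewrite | github.com/vickdavinci/alpha-nextgen-v2-private | scripts/analyze_micro_v98_v2.py | get_option_type
-- ===== SOURCE A (Python) =====
-- def get_option_type(symbol):
--     if "C" in symbol:
--         for i, char in enumerate(symbol):
--             if char == "C":
--                 # Check if next chars are digits (it's the strike)
--                 if i + 1 < len(symbol) and symbol[i + 1].isdigit():
--                     return "CALL"
--     if "P" in symbol:
--         for i, char in enumerate(symbol):
--             if char == "P":
--                 if i + 1 < len(symbol) and symbol[i + 1].isdigit():
--                     return "PUT"
--     return "UNKNOWN"
-- ===== SOURCE B (Python) =====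
-- def get_option_type(symbol):
--     # One pass over adjacent character pairs with two flags, instead of
--     # two separate full scans; CALL keeps priority over PUT after the loop.
--     has_call = False
--     has_put = False
--     for a, b in zip(symbol, symbol[1:]):
--         if b.isdigit():
--             if a == "C":
--                 has_call = True
--             elif a == "P":
--                 has_put = True
--     if has_call:
--         return "CALL"
--     if has_put:
--         return "PUT"
--     return "UNKNOWN"
-- ===== Notes on version B (the rewrite author's own statement) =====
-- stated objective: alternative
-- what changed: Replaces A's two guarded full enumerate-and-index scans (one for 'C', one for 'P', each with an early return) by a single pass over zip(symbol, symbol[1:]) that accumulates two boolean flags and resolves the CALL-over-PUT priority after the loop.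
import Mathlib
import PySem

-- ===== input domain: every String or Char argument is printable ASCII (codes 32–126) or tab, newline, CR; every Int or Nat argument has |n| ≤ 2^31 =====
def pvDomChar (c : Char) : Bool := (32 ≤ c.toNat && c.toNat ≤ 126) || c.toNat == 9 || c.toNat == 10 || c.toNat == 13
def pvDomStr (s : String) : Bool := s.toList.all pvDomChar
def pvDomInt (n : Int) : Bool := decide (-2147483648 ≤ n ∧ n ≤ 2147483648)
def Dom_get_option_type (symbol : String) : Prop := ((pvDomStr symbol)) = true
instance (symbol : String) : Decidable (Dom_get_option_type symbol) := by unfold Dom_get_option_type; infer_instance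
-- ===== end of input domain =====

-- B replaces A's two guarded indexed scans by one pass over adjacent pairs with two flags (alternative decomposition, same cost).

-- ===== PORT A =====
-- the 'for i, char in enumerate(symbol): if char == t and i+1 < len and symbol[i+1].isdigit(): return' loop
def pvScanA (s : List Char) (t : Char) : List (Int × Char) → Bool
  | [] => false
  | (i, c) :: rest =>
    if c = t then
      if i + 1 < (s.length : Int) ∧
          ((PySem.List.pyGet? s (i + 1)).elim false PySem.Chars.isdigit) = true then
        true
      else pvScanA s t rest
    else pvScanA s t rest

def get_option_type (symbol : String) : String :=
  let s := symbol.toList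
  if PySem.Chars.isIn ['C'] s = true ∧ pvScanA s 'C' (PySem.List.enumerate s) = true then "CALL"
  else if PySem.Chars.isIn ['P'] s = true ∧ pvScanA s 'P' (PySem.List.enumerate s) = true then "PUT"
  else "UNKNOWN"

-- ===== PORT B =====
def pvStep (fl : Bool × Bool) (p : Char × Char) : Bool × Bool :=
  if PySem.Chars.isdigit p.2 then
    if p.1 = 'C' then (true, fl.2)
    else if p.1 = 'P' then (fl.1, true)
    else fl
  else fl

def get_option_type_alt (symbol : String) : String :=
  let s := symbol.toList
  let fl := (s.zip (s.drop 1)).foldl pvStep (false, false)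
  if fl.1 then "CALL"
  else if fl.2 then "PUT"
  else "UNKNOWN"

-- ===== PRECONDITION & SPEC =====
def Spec_get_option_type (symbol : String) (out : String) : Prop := out = get_option_type_alt symbol
instance (symbol : String) (out : String) : Decidable (Spec_get_option_type symbol out) := by unfold Spec_get_option_type; infer_instance

-- ===== CLAIM (what is proved, stated in full; the proofs are below) =====
def Claim_equal_get_option_type : Prop := ∀ (symbol : String), Dom_get_option_type symbol → Spec_get_option_type symbol (get_option_type symbol)

-- ===== LEMMAS AND PROOFS =====

-- adjacency predicate both programs decide: pair (a,b) with a = t and b a digit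
def pvAdj (t : Char) (p : Char × Char) : Bool := p.1 = t && PySem.Chars.isdigit p.2

-- B's fold accumulates the two flags
lemma foldB_eq (l : List (Char × Char)) (c0 p0 : Bool) :
    l.foldl pvStep (c0, p0) = (c0 || l.any (pvAdj 'C'), p0 || l.any (pvAdj 'P')) := by
  induction l generalizing c0 p0 with
  | nil => simp
  | cons p rest ih =>
    rcases p with ⟨a, b⟩
    simp only [List.foldl_cons, List.any_cons, pvStep, pvAdj]
    by_cases hd : PySem.Chars.isdigit b = true <;>
      by_cases hc : a = 'C' <;> by_cases hp : a = 'P'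
    all_goals simp [hd, hc, hp, ih]

-- A's scan over the enumerated suffix equals 'any' over adjacent pairs of that suffix
lemma scanA_eq (s : List Char) (t : Char) (n : Nat) :
    pvScanA s t (PySem.List.enumerate (s.drop n) n) =
      ((s.drop n).zip (s.drop (n + 1))).any (pvAdj t) := by
  generalize hu : s.drop n = u
  induction u generalizing n with
  | nil => simp [pvScanA, PySem.List.enumerate]
  | cons c u' ih =>
    have hu' : s.drop (n + 1) = u' := by
      have := congrArg (List.drop 1) hu
      simpa [List.drop_drop, Nat.add_comm] using this
    have hget : s[n + 1]? = u'[0]? := by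
      rw [← hu']; simp [List.getElem?_drop]
    rw [hu', PySem.List.enumerate_cons]
    cases u' with
    | nil =>
      have hlen : ¬ ((n : Int) + 1 < (s.length : Int)) := by
        have : s.length - (n + 1) = 0 := by
          have := congrArg List.length hu'; simpa using this
        omega
      rw [pvScanA]
      simp [hlen, pvScanA, PySem.List.enumerate]
    | cons d u'' =>
      have hu'' : s.drop (n + 1 + 1) = u'' := by
        have := congrArg (List.drop 1) hu'
        simpa [List.drop_drop, Nat.add_comm] using this
      have hlen : ((n : Int) + 1 < (s.length : Int)) := by
        have : s.length - (n + 1) = u''.length + 1 := by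
          have := congrArg List.length hu'; simpa using this
        omega
      have hpy : PySem.List.pyGet? s ((n : Int) + 1) = some d := by
        have : ((n : Int) + 1) = ((n + 1 : Nat) : Int) := by push_cast; ring
        rw [this, PySem.List.pyGet?_natCast, hget]; rfl
      have hrec := ih (n + 1) hu'
      rw [hu''] at hrec
      push_cast at hrec
      rw [PySem.List.enumerate_cons] at hrec
      rw [pvScanA]
      simp only [List.zip_cons_cons, List.any_cons, pvAdj]
      by_cases hc : c = t <;> by_cases hd : PySem.Chars.isdigit d = true <;>
        simp [hc, hd, hlen, hpy, hrec]

-- the membership guard in A is redundant when the scan fires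
lemma isIn_of_any (s : List Char) (t : Char)
    (h : ((s.zip (s.drop 1)).any (pvAdj t)) = true) :
    PySem.Chars.isIn [t] s = true := by
  rw [List.any_eq_true] at h
  obtain ⟨p, hmem, hp⟩ := h
  rcases p with ⟨a, b⟩
  have ha : a ∈ s := (List.of_mem_zip hmem).1
  have hat : a = t := by
    simp only [pvAdj, Bool.and_eq_true, decide_eq_true_eq] at hp
    exact hp.1
  rw [PySem.Chars.isIn_iff_infix]
  obtain ⟨l1, l2, rfl⟩ := List.append_of_mem ha
  exact ⟨l1, l2, by simp [hat]⟩

-- ===== VERDICT (by name: the statement is the Claim_ definition above) =====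
theorem get_option_type_spec : Claim_equal_get_option_type := by
  intro symbol _
  unfold Spec_get_option_type get_option_type get_option_type_alt
  have hscan : ∀ t, pvScanA symbol.toList t (PySem.List.enumerate symbol.toList) =
      (symbol.toList.zip (symbol.toList.drop 1)).any (pvAdj t) := by
    intro t
    have := scanA_eq symbol.toList t 0
    simpa using this
  simp only [hscan, foldB_eq, Bool.false_or]
  by_cases hC : (symbol.toList.zip (symbol.toList.drop 1)).any (pvAdj 'C') = true
  · simp only [hC, isIn_of_any _ _ hC, and_self, if_true]
  · by_cases hP : (symbol.toList.zip (symbol.toList.drop 1)).any (pvAdj 'P') = true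
    · simp only [hP, isIn_of_any _ _ hP, and_self, if_true]
      simp only [List.any_eq_true, List.drop_one] at hC
      simp [hC]
    · simp only [List.any_eq_true, List.drop_one] at hC hP
      simp [hC, hP]
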